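-- pv_equiv track=rewrite | github.com/haliluddin/PPE-Compliance-Monitoring-of-Construction-Workers-System | scripts/ingest.py | build_remap
-- ===== SOURCE A (Python) =====
-- def build_remap(platforms, synonyms, master_classes):
--     remaps = {}
--     for pname, cmap in platforms.items():
--         mapping = {}
--         for lbl, orig in cmap.items():
--             key = str(lbl).strip().lower()
--             try:
--                 orig_i = int(orig)
--             except Exception:
--                 continue
--             if key in master_classes:
--                 mapping[orig_i] = master_classes[key]
--                 continue
--             syn = synonyms.get(key)
--             if syn and syn in master_classes:
--                 mapping[orig_i] = master_classes[syn]
--         remaps[pname] = mapping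
--     return remaps
-- ===== SOURCE B (Python) =====
-- def build_remap(platforms, synonyms, master_classes):
--     # Pipeline: flatten all platforms into one stream, rewrite keys in one
--     # substitution pass, then regroup into pre-seeded per-platform dicts.
--     def parse(o):
--         try:
--             return int(o)
--         except Exception:
--             return None
--
--     # stage 1: one flat stream of (platform, normalized label, raw id) triples
--     flat = [(p, str(l).strip().lower(), o)
--             for p, cmap in platforms.items() for l, o in cmap.items()]
--     # stage 2: parse ids (dropping unparsable ones) and rewrite each key:
--     # keep a direct master key as-is, else substitute its truthy synonym
--     # (or None when there is none)
--     resolved = [(p, k if k in master_classes else (synonyms.get(k) or None), i)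
--                 for p, k, o in flat if (i := parse(o)) is not None]
--     # stage 3: seed every platform, then fill in stream order
--     remaps = {p: {} for p in platforms}
--     for p, k, i in resolved:
--         if k is not None and k in master_classes:
--             remaps[p][i] = master_classes[k]
--     return remaps
-- ===== Notes on version B (the rewrite author's own statement) =====
-- stated objective: alternative
-- what changed: B replaces A's nested loops with inline two-branch resolution by a three-stage pipeline: flatten all platforms into one stream of (platform, normalized label, raw id) triples, one substitution pass that parses ids and rewrites each key (direct master key kept, else its truthy synonym), then a regrouping pass that fills pre-seeded per-platform dicts in stream order.
import Mathlib
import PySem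

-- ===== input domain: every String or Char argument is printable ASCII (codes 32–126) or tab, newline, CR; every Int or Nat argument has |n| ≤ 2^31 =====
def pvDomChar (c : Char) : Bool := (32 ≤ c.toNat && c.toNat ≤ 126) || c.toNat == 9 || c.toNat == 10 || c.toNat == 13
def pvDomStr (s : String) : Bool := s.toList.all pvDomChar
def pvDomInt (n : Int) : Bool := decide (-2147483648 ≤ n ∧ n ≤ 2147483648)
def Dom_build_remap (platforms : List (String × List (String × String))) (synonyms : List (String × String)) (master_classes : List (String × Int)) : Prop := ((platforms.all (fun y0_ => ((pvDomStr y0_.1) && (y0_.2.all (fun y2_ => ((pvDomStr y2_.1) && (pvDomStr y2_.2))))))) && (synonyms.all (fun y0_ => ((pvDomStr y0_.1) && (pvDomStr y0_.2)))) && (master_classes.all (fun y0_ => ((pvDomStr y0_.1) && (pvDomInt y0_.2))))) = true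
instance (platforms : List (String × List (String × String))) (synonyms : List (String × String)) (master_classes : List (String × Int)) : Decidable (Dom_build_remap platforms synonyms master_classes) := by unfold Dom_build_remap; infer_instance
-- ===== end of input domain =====

-- B restructures A's nested loops with inline two-branch resolution into a three-stage
-- pipeline: flatten, one key-substitution pass, regroup into pre-seeded per-platform dicts
-- (objective: alternative, same cost).

-- ===== PORT A =====
-- inner loop body of A: resolve key via master_classes first, then synonyms
def pyAStep (mcd : PySem.Dict String Int) (syd : PySem.Dict String String)
    (mapping : PySem.Dict Int Int) (lo : String × String) : PySem.Dict Int Int :=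
  let key := PySem.Str.lower (PySem.Str.strip lo.1)
  match PySem.Int.ofStr? lo.2 with
  | none => mapping
  | some oi =>
    match mcd.get? key with
    | some v => mapping.insert oi v
    | none =>
      match syd.get? key with
      | some syn =>
        if syn ≠ "" then
          match mcd.get? syn with
          | some v => mapping.insert oi v
          | none => mapping
        else mapping
      | none => mapping

def build_remap (platforms : List (String × List (String × String))) (synonyms : List (String × String)) (master_classes : List (String × Int)) : List (String × List (Int × Int)) :=
  let mcd := PySem.Dict.ofList master_classes
  let syd := PySem.Dict.ofList synonyms
  let remaps : PySem.Dict String (PySem.Dict Int Int) :=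
    (PySem.Dict.ofList platforms).items.foldl
      (fun remaps p =>
        remaps.insert p.1 ((PySem.Dict.ofList p.2).items.foldl (pyAStep mcd syd) PySem.Dict.empty))
      PySem.Dict.empty
  remaps.items.map (fun p => (p.1, p.2.items))

-- ===== PORT B =====
-- stage-2 key rewrite of B: a direct master key stays, else its truthy synonym (or none)
def pyBResolve (mcd : PySem.Dict String Int) (syd : PySem.Dict String String) (k : String) : Option String :=
  if mcd.contains k then some k
  else
    match syd.get? k with
    | some s => if s ≠ "" then some s else none
    | none => none

-- stage-3 fill step of B: `if k is not None and k in master_classes: remaps[p][i] = master_classes[k]`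
def pyBFill (mcd : PySem.Dict String Int)
    (d : PySem.Dict String (PySem.Dict Int Int)) (t : String × Option String × Int) :
    PySem.Dict String (PySem.Dict Int Int) :=
  match t.2.1 with
  | some k =>
    match mcd.get? k with
    | some v => d.modify t.1 PySem.Dict.empty (fun m => m.insert t.2.2 v)
    | none => d
  | none => d

def build_remap_alt (platforms : List (String × List (String × String))) (synonyms : List (String × String)) (master_classes : List (String × Int)) : List (String × List (Int × Int)) :=
  let mcd := PySem.Dict.ofList master_classes
  let syd := PySem.Dict.ofList synonyms
  let plats := (PySem.Dict.ofList platforms).items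
  -- stage 1: flat stream of (platform, normalized label, raw id)
  let flat := plats.flatMap (fun p =>
    (PySem.Dict.ofList p.2).items.map
      (fun lo => (p.1, PySem.Str.lower (PySem.Str.strip lo.1), lo.2)))
  -- stage 2: parse ids (drop failures) and rewrite keys
  let resolved := flat.filterMap (fun t =>
    match PySem.Int.ofStr? t.2.2 with
    | some i => some (t.1, pyBResolve mcd syd t.2.1, i)
    | none => none)
  -- stage 3: seed every platform, then fill in stream order
  let seeded := plats.foldl (fun d p => d.insert p.1 PySem.Dict.empty)
    (PySem.Dict.empty : PySem.Dict String (PySem.Dict Int Int))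
  let remaps := resolved.foldl (pyBFill mcd) seeded
  remaps.items.map (fun p => (p.1, p.2.items))

-- ===== PRECONDITION & SPEC =====
def Spec_build_remap (platforms : List (String × List (String × String))) (synonyms : List (String × String)) (master_classes : List (String × Int)) (out : List (String × List (Int × Int))) : Prop := out = build_remap_alt platforms synonyms master_classes
instance (platforms : List (String × List (String × String))) (synonyms : List (String × String)) (master_classes : List (String × Int)) (out : List (String × List (Int × Int))) : Decidable (Spec_build_remap platforms synonyms master_classes out) := by unfold Spec_build_remap; infer_instance

-- ===== CLAIM (what is proved, stated in full; the proofs are below) =====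
def Claim_equal_build_remap : Prop := ∀ (platforms : List (String × List (String × String))) (synonyms : List (String × String)) (master_classes : List (String × Int)), Dom_build_remap platforms synonyms master_classes → Spec_build_remap platforms synonyms master_classes (build_remap platforms synonyms master_classes)

-- ===== LEMMAS AND PROOFS =====

-- the stage-2 result of B restricted to one platform's labels
def pvResolvedOf (mcd : PySem.Dict String Int) (syd : PySem.Dict String String)
    (p : String) (cm : List (String × String)) : List (String × Option String × Int) :=
  cm.filterMap (fun lo =>
    match PySem.Int.ofStr? lo.2 with
    | some i => some (p, pyBResolve mcd syd (PySem.Str.lower (PySem.Str.strip lo.1)), i)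
    | none => none)

theorem pv_insert_get_self {κ ν : Type} [BEq κ] [LawfulBEq κ] (d : PySem.Dict κ ν) (k : κ) (v : ν)
    (hnd : d.keys.Nodup) (h : d.get? k = some v) : d.insert k v = d := by
  have hc : d.contains k = true := by
    rw [PySem.Dict.contains_eq_isSome_get?, h]; rfl
  apply PySem.Dict.ext
  rw [PySem.Dict.items_insert_of_contains d v hc]
  have he : ∀ p ∈ d.items, (if (p.1 == k) = true then (k, v) else p) = p := by
    intro p hp
    by_cases hpk : p.1 = k
    · have h2 := PySem.Dict.get?_of_mem_items d (k := p.1) (v := p.2) (by simpa using hp) hnd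
      rw [hpk, h] at h2
      have hv : p.2 = v := Option.some_inj.mp h2.symm
      simp [hpk, hv, Prod.ext_iff]
    · simp [hpk]
  rw [List.map_congr_left he]; simp

theorem pv_modify_of_get? {κ ν : Type} [BEq κ] [LawfulBEq κ] (d : PySem.Dict κ ν) (k : κ)
    (m : ν) (dflt : ν) (f : ν → ν) (h : d.get? k = some m) :
    d.modify k dflt f = d.insert k (f m) := by
  have hg : d.getD k dflt = m := PySem.Dict.getD_of_get?_eq_some d dflt h
  simp [PySem.Dict.modify, hg]

theorem pv_get_seed (plats : List (String × List (String × String)))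
    (d : PySem.Dict String (PySem.Dict Int Int)) (k : String)
    (h : ∀ q ∈ plats, q.1 ≠ k) :
    (plats.foldl (fun d p => d.insert p.1 PySem.Dict.empty) d).get? k = d.get? k := by
  induction plats generalizing d with
  | nil => rfl
  | cons p rest ih =>
    simp only [List.foldl_cons]
    rw [ih _ (fun q hq => h q (List.mem_cons_of_mem _ hq)),
      PySem.Dict.get?_insert_of_ne d PySem.Dict.empty (Ne.symm (h p (List.mem_cons_self)))]

theorem pv_insert_insert_comm {κ ν : Type} [BEq κ] [LawfulBEq κ] (d : PySem.Dict κ ν)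
    (a k : κ) (x w : ν) (hne : a ≠ k) (hc : d.contains k = true) :
    (d.insert a x).insert k w = (d.insert k w).insert a x := by
  apply PySem.Dict.ext
  have hck : (d.insert a x).contains k = true := by
    rw [PySem.Dict.contains_insert]; simp [hc]
  by_cases hca : d.contains a = true
  · have hca' : (d.insert k w).contains a = true := by
      rw [PySem.Dict.contains_insert]; simp [hca]
    rw [PySem.Dict.items_insert_of_contains _ w hck,
      PySem.Dict.items_insert_of_contains _ x hca,
      PySem.Dict.items_insert_of_contains _ x hca',
      PySem.Dict.items_insert_of_contains _ w hc,
      List.map_map, List.map_map]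
    apply List.map_congr_left
    intro p _
    by_cases h1 : p.1 = a
    · simp [h1, hne]
    · by_cases h2 : p.1 = k
      · simp [h2, Ne.symm hne]
      · simp [h1, h2]
  · have hca0 : d.contains a = false := by simpa using hca
    have hca' : (d.insert k w).contains a = false := by
      rw [PySem.Dict.contains_insert]; simp [hca0, hne]
    rw [PySem.Dict.items_insert_of_contains _ w hck,
      PySem.Dict.items_insert_of_not_contains _ x hca0,
      PySem.Dict.items_insert_of_not_contains _ x hca',
      PySem.Dict.items_insert_of_contains _ w hc,
      List.map_append]
    simp [hne]

theorem pv_seed_insert (rest : List (String × List (String × String)))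
    (d : PySem.Dict String (PySem.Dict Int Int)) (k : String) (w : PySem.Dict Int Int)
    (h : ∀ q ∈ rest, q.1 ≠ k) (hc : d.contains k = true) :
    (rest.foldl (fun d p => d.insert p.1 PySem.Dict.empty) d).insert k w
      = rest.foldl (fun d p => d.insert p.1 PySem.Dict.empty) (d.insert k w) := by
  induction rest generalizing d with
  | nil => rfl
  | cons r rest ih =>
    simp only [List.foldl_cons]
    rw [ih _ (fun q hq => h q (List.mem_cons_of_mem _ hq))
        (by rw [PySem.Dict.contains_insert]; simp [hc]),
      pv_insert_insert_comm d r.1 k PySem.Dict.empty w (h r (List.mem_cons_self)) hc]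

theorem pv_fill_block (mcd : PySem.Dict String Int) (syd : PySem.Dict String String)
    (p : String) (cm : List (String × String)) (d : PySem.Dict String (PySem.Dict Int Int))
    (m : PySem.Dict Int Int) (hnd : d.keys.Nodup) (h : d.get? p = some m) :
    (pvResolvedOf mcd syd p cm).foldl (pyBFill mcd) d
      = d.insert p (cm.foldl (pyAStep mcd syd) m) := by
  induction cm generalizing d m with
  | nil =>
    simp only [pvResolvedOf, List.filterMap_nil, List.foldl_nil]
    exact (pv_insert_get_self d p m hnd h).symm
  | cons lo cm ih =>
    cases hp : PySem.Int.ofStr? lo.2 with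
    | none =>
      have h1 : pvResolvedOf mcd syd p (lo :: cm) = pvResolvedOf mcd syd p cm := by
        simp [pvResolvedOf, hp]
      have h2 : pyAStep mcd syd m lo = m := by simp [pyAStep, hp]
      rw [h1, List.foldl_cons, h2]
      exact ih d m hnd h
    | some i =>
      have h1 : pvResolvedOf mcd syd p (lo :: cm)
          = (p, pyBResolve mcd syd (PySem.Str.lower (PySem.Str.strip lo.1)), i)
              :: pvResolvedOf mcd syd p cm := by
        simp [pvResolvedOf, hp]
      rw [h1, List.foldl_cons, List.foldl_cons]
      by_cases hck : mcd.contains (PySem.Str.lower (PySem.Str.strip lo.1)) = true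
      · obtain ⟨v, hv⟩ : ∃ v, mcd.get? (PySem.Str.lower (PySem.Str.strip lo.1)) = some v := by
          rw [PySem.Dict.contains_eq_isSome_get?] at hck
          exact Option.isSome_iff_exists.mp hck
        have hres : pyBResolve mcd syd (PySem.Str.lower (PySem.Str.strip lo.1))
            = some (PySem.Str.lower (PySem.Str.strip lo.1)) := by simp [pyBResolve, hck]
        have hfill : pyBFill mcd d
            (p, some (PySem.Str.lower (PySem.Str.strip lo.1)), i) = d.insert p (m.insert i v) := by
          simp only [pyBFill, hv]
          exact pv_modify_of_get? d p m _ _ h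
        have hstep : pyAStep mcd syd m lo = m.insert i v := by simp [pyAStep, hp, hv]
        rw [hres, hfill, hstep,
          ih (d.insert p (m.insert i v)) (m.insert i v)
            (PySem.Dict.nodup_keys_insert d p _ hnd) (PySem.Dict.get?_insert_self d p _),
          PySem.Dict.insert_insert_self]
      · have hck0 : mcd.contains (PySem.Str.lower (PySem.Str.strip lo.1)) = false := by
          simpa using hck
        have hg : mcd.get? (PySem.Str.lower (PySem.Str.strip lo.1)) = none :=
          (PySem.Dict.get?_eq_none_iff_contains mcd _).mpr hck0
        cases hs : syd.get? (PySem.Str.lower (PySem.Str.strip lo.1)) with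
        | none =>
          have hres : pyBResolve mcd syd (PySem.Str.lower (PySem.Str.strip lo.1)) = none := by
            simp [pyBResolve, hck0, hs]
          have hstep : pyAStep mcd syd m lo = m := by simp [pyAStep, hp, hg, hs]
          rw [hres, hstep]
          exact ih d m hnd h
        | some s =>
          by_cases hse : s = ""
          · have hres : pyBResolve mcd syd (PySem.Str.lower (PySem.Str.strip lo.1)) = none := by
              simp [pyBResolve, hck0, hs, hse]
            have hstep : pyAStep mcd syd m lo = m := by simp [pyAStep, hp, hg, hs, hse]
            rw [hres, hstep]
            exact ih d m hnd h
          · have hres : pyBResolve mcd syd (PySem.Str.lower (PySem.Str.strip lo.1)) = some s := by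
              simp [pyBResolve, hck0, hs, hse]
            cases hms : mcd.get? s with
            | some v =>
              have hfill : pyBFill mcd d (p, some s, i) = d.insert p (m.insert i v) := by
                simp only [pyBFill, hms]
                exact pv_modify_of_get? d p m _ _ h
              have hstep : pyAStep mcd syd m lo = m.insert i v := by
                simp [pyAStep, hp, hg, hs, hse, hms]
              rw [hres, hfill, hstep,
                ih (d.insert p (m.insert i v)) (m.insert i v)
                  (PySem.Dict.nodup_keys_insert d p _ hnd) (PySem.Dict.get?_insert_self d p _),
                PySem.Dict.insert_insert_self]
            | none =>
              have hfill : pyBFill mcd d (p, some s, i) = d := by simp [pyBFill, hms]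
              have hstep : pyAStep mcd syd m lo = m := by simp [pyAStep, hp, hg, hs, hse, hms]
              rw [hres, hfill, hstep]
              exact ih d m hnd h

theorem pv_outer (mcd : PySem.Dict String Int) (syd : PySem.Dict String String)
    (plats : List (String × List (String × String)))
    (d : PySem.Dict String (PySem.Dict Int Int))
    (hnd : d.keys.Nodup) (hk : (plats.map (·.1)).Nodup) :
    ((plats.flatMap (fun q => pvResolvedOf mcd syd q.1 (PySem.Dict.ofList q.2).items)).foldl
        (pyBFill mcd) (plats.foldl (fun d p => d.insert p.1 PySem.Dict.empty) d))
      = plats.foldl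
          (fun d p => d.insert p.1 ((PySem.Dict.ofList p.2).items.foldl (pyAStep mcd syd) PySem.Dict.empty)) d := by
  induction plats generalizing d with
  | nil => rfl
  | cons p rest ih =>
    simp only [List.flatMap_cons, List.foldl_cons, List.foldl_append]
    have hk2 : (p.1 :: rest.map (·.1)).Nodup := by simpa using hk
    have hk' := List.nodup_cons.mp hk2
    have hne : ∀ q ∈ rest, q.1 ≠ p.1 := fun q hq hqe =>
      hk'.1 (hqe ▸ List.mem_map_of_mem (f := (·.1)) hq)
    have h1 : (rest.foldl (fun d p => d.insert p.1 PySem.Dict.empty)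
        (d.insert p.1 PySem.Dict.empty)).get? p.1 = some PySem.Dict.empty := by
      rw [pv_get_seed rest _ _ hne, PySem.Dict.get?_insert_self]
    have hnd1 : (rest.foldl (fun d p => d.insert p.1 PySem.Dict.empty)
        (d.insert p.1 PySem.Dict.empty)).keys.Nodup :=
      PySem.Dict.nodup_keys_foldl_insert_key rest (·.1) (fun _ _ => PySem.Dict.empty) _
        (PySem.Dict.nodup_keys_insert d p.1 _ hnd)
    rw [pv_fill_block mcd syd p.1 (PySem.Dict.ofList p.2).items _ PySem.Dict.empty hnd1 h1,
      pv_seed_insert rest (d.insert p.1 PySem.Dict.empty) p.1 _ hne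
        (by rw [PySem.Dict.contains_insert]; simp),
      PySem.Dict.insert_insert_self]
    exact ih (d.insert p.1 _) (PySem.Dict.nodup_keys_insert d p.1 _ hnd) hk'.2

theorem pv_resolved_eq (mcd : PySem.Dict String Int) (syd : PySem.Dict String String)
    (plats : List (String × List (String × String))) :
    ((plats.flatMap (fun p =>
        (PySem.Dict.ofList p.2).items.map
          (fun lo => (p.1, PySem.Str.lower (PySem.Str.strip lo.1), lo.2)))).filterMap (fun t =>
      match PySem.Int.ofStr? t.2.2 with
      | some i => some (t.1, pyBResolve mcd syd t.2.1, i)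
      | none => none))
      = plats.flatMap (fun q => pvResolvedOf mcd syd q.1 (PySem.Dict.ofList q.2).items) := by
  induction plats with
  | nil => rfl
  | cons p rest ih =>
    simp only [List.flatMap_cons, List.filterMap_append, ih, List.filterMap_map]
    rfl

-- ===== VERDICT (by name: the statement is the Claim_ definition above) =====
theorem build_remap_spec : Claim_equal_build_remap := by
  intro platforms synonyms master_classes _
  simp only [Spec_build_remap, build_remap, build_remap_alt]
  rw [pv_resolved_eq,
    pv_outer (PySem.Dict.ofList master_classes) (PySem.Dict.ofList synonyms)
      (PySem.Dict.ofList platforms).items PySem.Dict.empty PySem.Dict.nodup_keys_empty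
      (by simpa [PySem.Dict.keys] using PySem.Dict.nodup_keys_ofList platforms)]
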